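-- pv_equiv track=rewrite | github.com/jainy007/TRIAGE_BRAIN_MVP | src/triage_brain/perf_tester.py | _is_prediction_correct
-- ===== SOURCE A (Python) =====
-- def _is_prediction_correct(predicted: str, expected: str) -> bool:
--     """Check if prediction is correct with flexible matching"""
--
--     if predicted == expected:
--         return True
--
--     # Group similar behaviors for evaluation
--     similar_groups = [
--         ['nearmiss', 'overshoot', 'oversteering'],  # Dangerous behaviors
--         ['pedestrian', 'bicycle'],  # External entities
--         ['hesitation', 'stop_behavior'],  # Stop/slow behaviors
--         ['lane_change', 'turning'],  # Lane changes
--         ['obstacles', 'vehicle_interaction'],  # Obstacle avoidance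
--         ['road_conditions', 'other']  # Environmental
--     ]
--
--     for group in similar_groups:
--         if predicted in group and expected in group:
--             return True
--
--     return False
-- ===== SOURCE B (Python) =====
-- # Canonical-representative formulation: every label is mapped to the canonical
-- # representative of its similarity group (unknown labels are their own canonical
-- # form), and the check is a single equality of canonical forms.
-- _CANONICAL = {
--     'nearmiss': 'nearmiss', 'overshoot': 'nearmiss', 'oversteering': 'nearmiss',
--     'pedestrian': 'pedestrian', 'bicycle': 'pedestrian',
--     'hesitation': 'hesitation', 'stop_behavior': 'hesitation',
--     'lane_change': 'lane_change', 'turning': 'lane_change',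
--     'obstacles': 'obstacles', 'vehicle_interaction': 'obstacles',
--     'road_conditions': 'road_conditions', 'other': 'road_conditions',
-- }
--
--
-- def _is_prediction_correct(predicted: str, expected: str) -> bool:
--     """Check if prediction is correct with flexible matching"""
--     return _CANONICAL.get(predicted, predicted) == _CANONICAL.get(expected, expected)
-- ===== Notes on version B (the rewrite author's own statement) =====
-- stated objective: alternative
-- what changed: Reformulates the check as canonicalization: each label maps to its group's canonical representative (unknown labels canonicalize to themselves), so the body is one equality of canonical forms instead of an equality fast path plus a scan over the six group lists.
import Mathlib
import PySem

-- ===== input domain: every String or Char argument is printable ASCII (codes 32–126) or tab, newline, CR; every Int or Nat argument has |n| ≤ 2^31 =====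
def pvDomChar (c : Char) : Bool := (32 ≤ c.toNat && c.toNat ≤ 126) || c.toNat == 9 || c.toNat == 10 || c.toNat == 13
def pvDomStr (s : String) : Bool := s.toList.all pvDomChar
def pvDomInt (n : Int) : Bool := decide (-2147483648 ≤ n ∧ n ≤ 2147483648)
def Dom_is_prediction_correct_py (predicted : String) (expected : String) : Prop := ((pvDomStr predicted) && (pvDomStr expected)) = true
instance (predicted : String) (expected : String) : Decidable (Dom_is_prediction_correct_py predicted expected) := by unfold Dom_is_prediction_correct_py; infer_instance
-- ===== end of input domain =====

-- B reformulates A's equality-or-group-scan as canonicalization: each label maps to its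
-- group's representative (unknown labels to themselves) and the body is a single equality.

-- ===== PORT A =====
def pvSimilarGroups : List (List String) :=
  [["nearmiss", "overshoot", "oversteering"],
   ["pedestrian", "bicycle"],
   ["hesitation", "stop_behavior"],
   ["lane_change", "turning"],
   ["obstacles", "vehicle_interaction"],
   ["road_conditions", "other"]]

-- 'for group in similar_groups: if predicted in group and expected in group: return True'
-- followed by 'return False' is List.any over the groups.
def is_prediction_correct_py (predicted : String) (expected : String) : Bool :=
  if predicted = expected then true
  else pvSimilarGroups.any (fun group => group.contains predicted && group.contains expected)

-- ===== PORT B =====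
-- the literal _CANONICAL dict of Source B
def pvCanonical : PySem.Dict String String :=
  PySem.Dict.ofList
    [("nearmiss", "nearmiss"), ("overshoot", "nearmiss"), ("oversteering", "nearmiss"),
     ("pedestrian", "pedestrian"), ("bicycle", "pedestrian"),
     ("hesitation", "hesitation"), ("stop_behavior", "hesitation"),
     ("lane_change", "lane_change"), ("turning", "lane_change"),
     ("obstacles", "obstacles"), ("vehicle_interaction", "obstacles"),
     ("road_conditions", "road_conditions"), ("other", "road_conditions")]

-- 'return _CANONICAL.get(predicted, predicted) == _CANONICAL.get(expected, expected)'
def is_prediction_correct_py_alt (predicted : String) (expected : String) : Bool :=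
  pvCanonical.getD predicted predicted == pvCanonical.getD expected expected

-- ===== PRECONDITION & SPEC =====
def Spec_is_prediction_correct_py (predicted : String) (expected : String) (out : Bool) : Prop := out = is_prediction_correct_py_alt predicted expected
instance (predicted : String) (expected : String) (out : Bool) : Decidable (Spec_is_prediction_correct_py predicted expected out) := by unfold Spec_is_prediction_correct_py; infer_instance

-- ===== CLAIM (what is proved, stated in full; the proofs are below) =====
def Claim_equal_is_prediction_correct_py : Prop := ∀ (predicted : String) (expected : String), Dom_is_prediction_correct_py predicted expected → Spec_is_prediction_correct_py predicted expected (is_prediction_correct_py predicted expected)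

-- ===== LEMMAS AND PROOFS =====

-- all thirteen labels occurring in the groups / the table
def pvLabels : List String :=
  ["nearmiss", "overshoot", "oversteering", "pedestrian", "bicycle",
   "hesitation", "stop_behavior", "lane_change", "turning",
   "obstacles", "vehicle_interaction", "road_conditions", "other"]

-- pvCanonical's items, computed once (all 13 keys are distinct, so update just appends)
lemma pvCanonical_eq : pvCanonical = PySem.Dict.mk
    [("nearmiss", "nearmiss"), ("overshoot", "nearmiss"), ("oversteering", "nearmiss"),
     ("pedestrian", "pedestrian"), ("bicycle", "pedestrian"),
     ("hesitation", "hesitation"), ("stop_behavior", "hesitation"),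
     ("lane_change", "lane_change"), ("turning", "lane_change"),
     ("obstacles", "obstacles"), ("vehicle_interaction", "obstacles"),
     ("road_conditions", "road_conditions"), ("other", "road_conditions")] := by
  decide

-- a label outside the table: A sees it in no group, B canonicalizes it to itself
set_option maxRecDepth 4096 in
lemma pv_unknown (s : String) (h : s ∉ pvLabels) :
    (∀ g ∈ pvSimilarGroups, s ∉ g) ∧ pvCanonical.getD s s = s := by
  simp [pvLabels] at h
  obtain ⟨h1,h2,h3,h4,h5,h6,h7,h8,h9,h10,h11,h12,h13⟩ := h
  have h1' := Ne.symm h1; have h2' := Ne.symm h2; have h3' := Ne.symm h3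
  have h4' := Ne.symm h4; have h5' := Ne.symm h5; have h6' := Ne.symm h6
  have h7' := Ne.symm h7; have h8' := Ne.symm h8; have h9' := Ne.symm h9
  have h10' := Ne.symm h10; have h11' := Ne.symm h11; have h12' := Ne.symm h12
  have h13' := Ne.symm h13
  constructor
  · simp [pvSimilarGroups, h1,h2,h3,h4,h5,h6,h7,h8,h9,h10,h11,h12,h13]
  · simp [pvCanonical_eq, PySem.Dict.getD, PySem.Dict.get?,
      h1',h2',h3',h4',h5',h6',h7',h8',h9',h10',h11',h12',h13']

-- a known label canonicalizes to a known label
set_option maxRecDepth 4096 in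
lemma pv_canon_mem (s : String) (h : s ∈ pvLabels) : pvCanonical.getD s s ∈ pvLabels := by
  fin_cases h <;> decide

-- ===== VERDICT (by name: the statement is the Claim_ definition above) =====
set_option maxRecDepth 8192 in
theorem is_prediction_correct_py_spec : Claim_equal_is_prediction_correct_py := by
  intro p e _
  unfold Spec_is_prediction_correct_py
  by_cases hp : p ∈ pvLabels
  · by_cases he : e ∈ pvLabels
    · simp only [pvLabels, List.mem_cons, List.not_mem_nil, or_false] at hp he
      rcases hp with rfl|rfl|rfl|rfl|rfl|rfl|rfl|rfl|rfl|rfl|rfl|rfl|rfl <;>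
        rcases he with rfl|rfl|rfl|rfl|rfl|rfl|rfl|rfl|rfl|rfl|rfl|rfl|rfl <;> decide
    · -- e unknown: A is false (p ≠ e and e in no group); B compares a known canonical with e
      obtain ⟨ha, hb⟩ := pv_unknown e he
      have hpe : p ≠ e := fun h => he (h ▸ hp)
      have hc := pv_canon_mem p hp
      have hne : pvCanonical.getD p p ≠ e := fun h => he (h ▸ hc)
      have hF : (pvCanonical.getD p p == e) = false := by simp [hne]
      simp [is_prediction_correct_py, is_prediction_correct_py_alt, hpe, hb, hF]
      exact fun x hx _ => ha x hx
  · -- p unknown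
    obtain ⟨ha, hb⟩ := pv_unknown p hp
    by_cases he : e ∈ pvLabels
    · have hpe : p ≠ e := fun h => hp (h ▸ he)
      have hc := pv_canon_mem e he
      have hne : p ≠ pvCanonical.getD e e := fun h => hp (h ▸ hc)
      have hF : (p == pvCanonical.getD e e) = false := by simp [hne]
      simp [is_prediction_correct_py, is_prediction_correct_py_alt, hpe, hb, hF]
      intro x hx hpx
      exact absurd hpx (ha x hx)
    · obtain ⟨_, hb'⟩ := pv_unknown e he
      by_cases hpe : p = e
      · simp [is_prediction_correct_py, is_prediction_correct_py_alt, hpe]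
      · have hF : (p == e) = false := by simp [hpe]
        simp [is_prediction_correct_py, is_prediction_correct_py_alt, hpe, hb, hb', hF]
        intro x hx hpx
        exact absurd hpx (ha x hx)
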